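-- pv_equiv track=rewrite | github.com/ErinC123/Algorithm | 205. Isomorphic Strings.py | geneNum
-- ===== SOURCE A (Python) =====
-- def geneNum(str):
--         nums = []
--         hash = {}
--         for i in range(len(str)):
--             if str[i] not in hash:
--                 nums.append(i)
--                 hash[str[i]] = i
--             else:
--                 nums.append(hash[str[i]])
--         return nums
-- ===== SOURCE B (Python) =====
-- def geneNum(str):
--     # Pass 1: map each character to its first-occurrence index.
--     first = {}
--     for i, c in enumerate(str):
--         if c not in first:
--             first[c] = i
--     # Pass 2: emit the canonical form from the completed table.
--     return [first[c] for c in str]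
-- ===== Notes on version B (the rewrite author's own statement) =====
-- stated objective: alternative
-- what changed: A interleaves table-building and output in one fused loop appending to nums; B first builds the full first-occurrence dict in one pass, then emits the output as a separate map over the string using the completed table.
import Mathlib
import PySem

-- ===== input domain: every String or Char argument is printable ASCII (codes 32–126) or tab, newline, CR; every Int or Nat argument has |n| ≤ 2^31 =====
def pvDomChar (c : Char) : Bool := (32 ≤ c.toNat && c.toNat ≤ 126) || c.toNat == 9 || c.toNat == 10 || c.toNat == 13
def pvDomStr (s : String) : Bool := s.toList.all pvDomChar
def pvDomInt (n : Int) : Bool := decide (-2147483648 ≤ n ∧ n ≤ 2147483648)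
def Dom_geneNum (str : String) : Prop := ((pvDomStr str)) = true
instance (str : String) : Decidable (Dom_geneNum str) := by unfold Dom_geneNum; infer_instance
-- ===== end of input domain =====

-- B builds the first-occurrence dict in one pass and then emits the output in a
-- separate map over the string, instead of A's single fused loop.

-- ===== PORT A =====
-- one loop: append to nums while populating hash
def geneNum (str : String) : List Int :=
  ((PySem.List.enumerate str.toList).foldl
    (fun (st : List Int × PySem.Dict Char Int) (p : Int × Char) =>
      if st.2.contains p.2 = false then
        (st.1 ++ [p.1], st.2.insert p.2 p.1)
      else
        (st.1 ++ [st.2.getD p.2 0], st.2))   -- hash[str[i]]: key present, getD exact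
    ([], PySem.Dict.empty)).1

-- ===== PORT B =====
-- pass 1: first-occurrence table
def geneNumFirst (str : String) : PySem.Dict Char Int :=
  (PySem.List.enumerate str.toList).foldl
    (fun (d : PySem.Dict Char Int) (p : Int × Char) =>
      if d.contains p.2 = false then d.insert p.2 p.1 else d)
    PySem.Dict.empty

-- pass 2: emit via the completed table (first[c]: key always present, getD exact)
def geneNum_alt (str : String) : List Int :=
  str.toList.map (fun c => (geneNumFirst str).getD c 0)

-- ===== PRECONDITION & SPEC =====
def Spec_geneNum (str : String) (out : List Int) : Prop := out = geneNum_alt str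
instance (str : String) (out : List Int) : Decidable (Spec_geneNum str out) := by unfold Spec_geneNum; infer_instance

-- ===== CLAIM (what is proved, stated in full; the proofs are below) =====
def Claim_equal_geneNum : Prop := ∀ (str : String), Dom_geneNum str → Spec_geneNum str (geneNum str)

-- ===== LEMMAS AND PROOFS =====

-- entries already in the dict survive B's build loop unchanged
theorem pvBuild_get?_mono (l : List (Int × Char)) :
    ∀ (d : PySem.Dict Char Int) (c : Char) (v : Int), d.get? c = some v →
    (l.foldl (fun (d : PySem.Dict Char Int) (p : Int × Char) =>
        if d.contains p.2 = false then d.insert p.2 p.1 else d) d).get? c = some v := by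
  induction l with
  | nil => intro d c v h; simpa using h
  | cons p l ih =>
    intro d c v h
    simp only [List.foldl_cons]
    by_cases hc : d.contains p.2 = false
    · simp only [hc, reduceIte]
      apply ih
      have hne : c ≠ p.2 := by
        intro he
        rw [PySem.Dict.contains_eq_isSome_get?, ← he, h] at hc
        simp at hc
      rw [PySem.Dict.get?_insert_of_ne _ _ hne, h]
    · simp only [hc]
      exact ih d c v h

-- A's fused loop = (prefix-output via the final dict, the final dict)
theorem pvLoop_eq (l : List (Int × Char)) :
    ∀ (nums : List Int) (d : PySem.Dict Char Int),
    (l.foldl (fun (st : List Int × PySem.Dict Char Int) (p : Int × Char) =>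
        if st.2.contains p.2 = false then (st.1 ++ [p.1], st.2.insert p.2 p.1)
        else (st.1 ++ [st.2.getD p.2 0], st.2)) (nums, d))
    = (nums ++ l.map (fun p =>
        (l.foldl (fun (d : PySem.Dict Char Int) (p : Int × Char) =>
            if d.contains p.2 = false then d.insert p.2 p.1 else d) d).getD p.2 0),
       l.foldl (fun (d : PySem.Dict Char Int) (p : Int × Char) =>
            if d.contains p.2 = false then d.insert p.2 p.1 else d) d) := by
  induction l with
  | nil => intro nums d; simp
  | cons p l ih =>
    intro nums d
    simp only [List.foldl_cons, List.map_cons]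
    cases hc : d.contains p.2 with
    | false =>
      simp only [if_true]
      rw [ih]
      have hfin : (l.foldl (fun (d : PySem.Dict Char Int) (p : Int × Char) =>
          if d.contains p.2 = false then d.insert p.2 p.1 else d) (d.insert p.2 p.1)).getD p.2 0 = p.1 := by
        have h := pvBuild_get?_mono l (d.insert p.2 p.1) p.2 p.1
          (PySem.Dict.get?_insert_self _ _ _)
        exact PySem.Dict.getD_of_get?_eq_some _ _ h
      rw [hfin, List.append_assoc]
      rfl
    | true =>
      simp only [Bool.true_eq_false, if_false]
      rw [ih]
      have hsome : ∃ v, d.get? p.2 = some v := by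
        rw [PySem.Dict.contains_eq_isSome_get?] at hc
        cases h : d.get? p.2 with
        | none => rw [h] at hc; simp at hc
        | some v => exact ⟨v, rfl⟩
      obtain ⟨v, hv⟩ := hsome
      have hfin : (l.foldl (fun (d : PySem.Dict Char Int) (p : Int × Char) =>
          if d.contains p.2 = false then d.insert p.2 p.1 else d) d).getD p.2 0 = v :=
        PySem.Dict.getD_of_get?_eq_some _ _ (pvBuild_get?_mono l d p.2 v hv)
      rw [hfin, PySem.Dict.getD_of_get?_eq_some _ _ hv, List.append_assoc]
      rfl

-- ===== VERDICT (by name: the statement is the Claim_ definition above) =====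
theorem geneNum_spec : Claim_equal_geneNum := by
  intro str _
  unfold Spec_geneNum geneNum geneNum_alt geneNumFirst
  rw [pvLoop_eq]
  simp only [List.nil_append]
  have := PySem.List.map_snd_enumerate str.toList 0
  calc (PySem.List.enumerate str.toList).map (fun p =>
        ((PySem.List.enumerate str.toList).foldl (fun (d : PySem.Dict Char Int) (p : Int × Char) =>
            if d.contains p.2 = false then d.insert p.2 p.1 else d) PySem.Dict.empty).getD p.2 0)
      = ((PySem.List.enumerate str.toList).map (·.2)).map (fun c =>
        ((PySem.List.enumerate str.toList).foldl (fun (d : PySem.Dict Char Int) (p : Int × Char) =>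
            if d.contains p.2 = false then d.insert p.2 p.1 else d) PySem.Dict.empty).getD c 0) := by
        rw [List.map_map]; rfl
    _ = _ := by rw [this]
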